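-- pv_equiv track=rewrite | github.com/Ayashy/project_image_caption | Src/Soft/utils.py | load_captions
-- ===== SOURCE A (Python) =====
-- import string
--
-- def load_captions(data, train_ids, eval_ids, test_ids, caps_per_img):
--     table = str.maketrans('', '', string.punctuation)
--     train_captions = {}
--     eval_captions = {}
--     test_captions = {}
--     for line in data.split('\n'):
--         tokens = line.split()
--         image_id, image_cap = tokens[0], tokens[1:]
--         image_id = image_id.split('.')[0]
--         image_cap = [w.translate(table) for w in image_cap]
--         #image_cap=[w for w in image_cap if len(w)>1]
--         image_cap = ' '.join(image_cap).lower()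
--         if image_id in train_ids:
--             if image_id not in train_captions.keys():
--                 train_captions[image_id] = []
--             if (len(train_captions[image_id]) <= caps_per_img):
--                 train_captions[image_id].append(image_cap)
--
--         if image_id in eval_ids:
--             if image_id not in eval_captions.keys():
--                 eval_captions[image_id] = []
--             if (len(eval_captions[image_id]) <= caps_per_img):
--                 eval_captions[image_id].append(image_cap)
--
--         if image_id in test_ids:
--             if image_id not in test_captions.keys():
--                 test_captions[image_id] = []
--             if (len(test_captions[image_id]) <= caps_per_img):
--                 test_captions[image_id].append(image_cap)
--
--     return train_captions, eval_captions, test_captions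
-- ===== SOURCE B (Python) =====
-- import string
--
-- def load_captions(data, train_ids, eval_ids, test_ids, caps_per_img):
--     table = str.maketrans('', '', string.punctuation)
--     # First pass: index all cleaned captions by image id, in first-appearance order.
--     grouped = {}
--     for line in data.split('\n'):
--         tokens = line.split()
--         image_id, image_cap = tokens[0], tokens[1:]
--         image_id = image_id.split('.')[0]
--         image_cap = [w.translate(table) for w in image_cap]
--         image_cap = ' '.join(image_cap).lower()
--         grouped.setdefault(image_id, []).append(image_cap)
--     # Second pass: project the index onto each id set, keeping at most caps_per_img + 1 captions.
--     keep = max(caps_per_img + 1, 0)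
--     train_captions = {i: c[:keep] for i, c in grouped.items() if i in train_ids}
--     eval_captions = {i: c[:keep] for i, c in grouped.items() if i in eval_ids}
--     test_captions = {i: c[:keep] for i, c in grouped.items() if i in test_ids}
--     return train_captions, eval_captions, test_captions
-- ===== Notes on version B (the rewrite author's own statement) =====
-- stated objective: alternative
-- what changed: A fuses parsing and three inline bucket/cap guards into one streaming loop over three dicts; B first builds a single ordered index image_id -> all cleaned captions, then projects it three ways by dict comprehension with a slice c[:max(caps_per_img+1,0)] replacing the per-append length guard.
import Mathlib
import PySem

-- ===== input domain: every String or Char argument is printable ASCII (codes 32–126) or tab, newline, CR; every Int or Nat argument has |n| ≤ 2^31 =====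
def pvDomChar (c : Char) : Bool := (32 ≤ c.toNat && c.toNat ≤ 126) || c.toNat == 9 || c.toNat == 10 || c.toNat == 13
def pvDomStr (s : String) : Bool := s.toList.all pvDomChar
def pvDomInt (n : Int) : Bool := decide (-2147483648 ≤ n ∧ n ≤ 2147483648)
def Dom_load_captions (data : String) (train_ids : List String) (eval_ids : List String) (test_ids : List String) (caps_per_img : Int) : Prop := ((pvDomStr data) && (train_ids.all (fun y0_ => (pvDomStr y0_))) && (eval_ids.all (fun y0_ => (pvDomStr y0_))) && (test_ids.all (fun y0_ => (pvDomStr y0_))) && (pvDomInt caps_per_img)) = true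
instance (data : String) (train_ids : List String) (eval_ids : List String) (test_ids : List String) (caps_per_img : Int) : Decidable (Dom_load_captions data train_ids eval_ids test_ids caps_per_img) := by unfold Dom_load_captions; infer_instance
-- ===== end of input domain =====

-- B replaces A's single fused loop over three capped dicts by: one pass grouping ALL cleaned
-- captions per image id, then three projections with a slice c[:max(caps_per_img+1,0)]
-- (objective: alternative decomposition, same asymptotic cost).

-- ===== PORT A =====
-- string.punctuation; w.translate(str.maketrans('', '', string.punctuation)) deletes exactly these chars
def pvPunct : List Char := "!\"#$%&'()*+,-./:;<=>?@[\\]^_`{|}~".toList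

def pvClean (w : String) : String := String.ofList (w.toList.filter (fun c => !(pvPunct.contains c)))

-- the line-parsing code shared verbatim by Source A and Source B: tokens = line.split();
-- image_id = tokens[0].split('.')[0]; cap = ' '.join(w.translate(table) for w in tokens[1:]).lower().
-- tokens[0] is pyGet?: none is Python's IndexError (excluded by Pre_); split('.') is never empty, so [0] is headD.
def pvParseLine (line : String) : Option (String × String) :=
  let tokens := PySem.Str.split₀ line
  match PySem.List.pyGet? tokens 0 with
  | none => none
  | some tok0 =>
      some ((((PySem.Str.split? tok0 ".").getD []).headD ""),
            PySem.Str.lower (PySem.Str.join " " ((tokens.drop 1).map pvClean)))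

-- the per-dict block A repeats three times (keys-membership, init-to-[], length-capped append)
def pvStepA (ids : List String) (caps_per_img : Int) (d : PySem.Dict String (List String))
    (image_id cap : String) : PySem.Dict String (List String) :=
  if image_id ∈ ids then
    let d1 := if d.contains image_id then d else d.insert image_id []
    if ((d1.getD image_id []).length : Int) ≤ caps_per_img then
      d1.modify image_id [] (fun c => c ++ [cap])
    else d1
  else d

def load_captions (data : String) (train_ids : List String) (eval_ids : List String) (test_ids : List String) (caps_per_img : Int) : (List (String × List String)) × (List (String × List String)) × (List (String × List String)) :=
  let st := (((PySem.Str.split? data "\n").getD [])).foldl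
    (fun (st : PySem.Dict String (List String) × PySem.Dict String (List String) × PySem.Dict String (List String)) line =>
      match pvParseLine line with
      | none => st   -- Python raises IndexError on a token-less line; excluded by Pre_
      | some pc =>
        (pvStepA train_ids caps_per_img st.1 pc.1 pc.2,
         pvStepA eval_ids caps_per_img st.2.1 pc.1 pc.2,
         pvStepA test_ids caps_per_img st.2.2 pc.1 pc.2))
    (PySem.Dict.empty, PySem.Dict.empty, PySem.Dict.empty)
  (st.1.items, st.2.1.items, st.2.2.items)

-- ===== PORT B =====
-- first pass of Source B: grouped.setdefault(image_id, []).append(cap)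
def pvGroup (data : String) : PySem.Dict String (List String) :=
  (((PySem.Str.split? data "\n").getD [])).foldl
    (fun g line =>
      match pvParseLine line with
      | none => g   -- Python raises IndexError on a token-less line; excluded by Pre_
      | some pc => g.modify pc.1 [] (fun c => c ++ [pc.2]))
    PySem.Dict.empty

-- {i: c[:keep] for i, c in grouped.items() if i in ids}
def pvProj (ids : List String) (keep : Nat) (p : String × List String) : Option (String × List String) :=
  if p.1 ∈ ids then some (p.1, p.2.take keep) else none

def pvProject (ids : List String) (keep : Nat) (g : PySem.Dict String (List String)) : List (String × List String) :=
  g.items.filterMap (pvProj ids keep)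

def load_captions_alt (data : String) (train_ids : List String) (eval_ids : List String) (test_ids : List String) (caps_per_img : Int) : (List (String × List String)) × (List (String × List String)) × (List (String × List String)) :=
  let grouped := pvGroup data
  let keep := (caps_per_img + 1).toNat   -- keep = max(caps_per_img + 1, 0)
  (pvProject train_ids keep grouped, pvProject eval_ids keep grouped, pvProject test_ids keep grouped)

-- ===== PRECONDITION & SPEC =====
-- Pre_ excludes exactly the inputs where A raises: a line of data with no whitespace-separated
-- token makes tokens[0] an IndexError (B raises there identically).
def Pre_load_captions (data : String) (train_ids : List String) (eval_ids : List String) (test_ids : List String) (caps_per_img : Int) : Prop :=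
  ∀ line ∈ ((PySem.Str.split? data "\n").getD []), PySem.Str.split₀ line ≠ []
instance (data : String) (train_ids : List String) (eval_ids : List String) (test_ids : List String) (caps_per_img : Int) : Decidable (Pre_load_captions data train_ids eval_ids test_ids caps_per_img) := by unfold Pre_load_captions; infer_instance

def pvWitness_load_captions : String × List String × List String × List String × Int :=
  ("a.jpg A dog!\nb Two dogs\na.jpg Dog, again", ["a"], ["b"], ["a"], 1)

def Spec_load_captions (data : String) (train_ids : List String) (eval_ids : List String) (test_ids : List String) (caps_per_img : Int) (out : (List (String × List String)) × (List (String × List String)) × (List (String × List String))) : Prop := out = load_captions_alt data train_ids eval_ids test_ids caps_per_img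
instance (data : String) (train_ids : List String) (eval_ids : List String) (test_ids : List String) (caps_per_img : Int) (out : (List (String × List String)) × (List (String × List String)) × (List (String × List String))) : Decidable (Spec_load_captions data train_ids eval_ids test_ids caps_per_img out) := by unfold Spec_load_captions; infer_instance

-- ===== CLAIM (what is proved, stated in full; the proofs are below) =====
def Claim_equal_load_captions : Prop := ∀ (data : String) (train_ids : List String) (eval_ids : List String) (test_ids : List String) (caps_per_img : Int), Dom_load_captions data train_ids eval_ids test_ids caps_per_img → Pre_load_captions data train_ids eval_ids test_ids caps_per_img → Spec_load_captions data train_ids eval_ids test_ids caps_per_img (load_captions data train_ids eval_ids test_ids caps_per_img)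

-- ===== LEMMAS AND PROOFS =====

-- keys appearing in a projection appear in the source
theorem pv_mem_filterMap_proj {ids : List String} {k : Nat} {g : List (String × List String)}
    {p : String × List String} (h : p ∈ g.filterMap (pvProj ids k)) :
    ∃ q ∈ g, p.1 = q.1 ∧ p.2 = q.2.take k := by
  obtain ⟨q, hq, hpq⟩ := List.mem_filterMap.1 h
  refine ⟨q, hq, ?_⟩
  unfold pvProj at hpq
  split at hpq
  · cases hpq; exact ⟨rfl, rfl⟩
  · cases hpq

theorem pv_any_filterMap (ids : List String) (k : Nat) (id : String) (g : List (String × List String)) :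
    (g.filterMap (pvProj ids k)).any (fun p => p.1 == id) = (decide (id ∈ ids) && g.any (fun p => p.1 == id)) := by
  induction g with
  | nil => simp
  | cons a g ih =>
    have hh : pvProj ids k a = if a.1 ∈ ids then some (a.1, a.2.take k) else none := rfl
    rw [List.filterMap_cons, hh]
    by_cases ha : a.1 ∈ ids
    · rw [if_pos ha, List.any_cons, ih]
      by_cases hid : a.1 = id
      · have hmem : id ∈ ids := hid ▸ ha
        simp [hid, hmem]
      · have hb : (a.1 == id) = false := by simp [hid]
        simp [hb]
    · rw [if_neg ha, ih]
      by_cases hid : a.1 = id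
      · have hnid : id ∉ ids := hid ▸ ha
        simp [hid, hnid]
      · have hb : (a.1 == id) = false := by simp [hid]
        simp [hb]

theorem pv_find?_filterMap {ids : List String} (k : Nat) {id : String} (hid : id ∈ ids)
    (g : List (String × List String)) :
    (g.filterMap (pvProj ids k)).find? (fun p => p.1 == id)
      = (g.find? (fun p => p.1 == id)).map (fun p => (p.1, p.2.take k)) := by
  induction g with
  | nil => simp
  | cons a g ih =>
    have hh : pvProj ids k a = if a.1 ∈ ids then some (a.1, a.2.take k) else none := rfl
    rw [List.filterMap_cons, hh]
    by_cases ha : a.1 ∈ ids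
    · rw [if_pos ha]
      by_cases heq : a.1 = id
      · rw [List.find?_cons_of_pos (by simp [heq]), List.find?_cons_of_pos (by simp [heq])]
        simp
      · rw [List.find?_cons_of_neg (by simp [heq]), List.find?_cons_of_neg (by simp [heq]), ih]
    · have heq : a.1 ≠ id := fun h => ha (h ▸ hid)
      rw [if_neg ha, List.find?_cons_of_neg (by simp [heq]), ih]

theorem pv_map_replace_eq_self {g : List (String × List String)} {id : String} {v : List String}
    (h : ∀ p ∈ g, p.1 = id → p = (id, v)) :
    g.map (fun p => if p.1 == id then (id, v) else p) = g := by
  induction g with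
  | nil => rfl
  | cons a g ih =>
    have ha := h a (by simp)
    have hg : ∀ p ∈ g, p.1 = id → p = (id, v) := fun p hp => h p (by simp [hp])
    rw [List.map_cons]
    by_cases heq : a.1 = id
    · rw [if_pos (by simp [heq]), ih hg, ← ha heq]
    · rw [if_neg (by simp [heq]), ih hg]

theorem pv_map_replace_of_no_key {g : List (String × List String)} {id : String} {v : List String}
    (h : g.any (fun p => p.1 == id) = false) :
    g.map (fun p => if p.1 == id then (id, v) else p) = g := by
  apply pv_map_replace_eq_self
  intro p hp hpid
  exfalso
  have := List.any_eq_false.1 h p hp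
  simp [hpid] at this

theorem pv_filterMap_replace_of_mem {ids : List String} (k : Nat) {id : String} (hid : id ∈ ids)
    (v : List String) (g : List (String × List String)) :
    (g.map (fun p => if p.1 == id then (id, v) else p)).filterMap (pvProj ids k)
      = (g.filterMap (pvProj ids k)).map (fun p => if p.1 == id then (id, v.take k) else p) := by
  induction g with
  | nil => rfl
  | cons a g ih =>
    simp only [List.map_cons]
    by_cases heq : a.1 = id
    · have h1 : (if a.1 == id then ((id, v) : String × List String) else a) = (id, v) := by simp [heq]
      have h2 : pvProj ids k (id, v) = some (id, v.take k) := by simp [pvProj, hid]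
      have h3 : pvProj ids k a = some (a.1, a.2.take k) := by simp [pvProj, heq ▸ hid]
      rw [List.filterMap_cons, h1, h2, List.filterMap_cons, h3, ih, List.map_cons]
      simp [heq]
    · have h1 : (if a.1 == id then ((id, v) : String × List String) else a) = a := by simp [heq]
      rw [List.filterMap_cons, h1, List.filterMap_cons]
      by_cases ha : a.1 ∈ ids
      · have h3 : pvProj ids k a = some (a.1, a.2.take k) := by simp [pvProj, ha]
        rw [h3, ih, List.map_cons]
        simp [heq]
      · have h3 : pvProj ids k a = none := by simp [pvProj, ha]
        rw [h3, ih]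

theorem pv_filterMap_replace_of_not_mem {ids : List String} (k : Nat) {id : String} (hid : id ∉ ids)
    (v : List String) (g : List (String × List String)) :
    (g.map (fun p => if p.1 == id then (id, v) else p)).filterMap (pvProj ids k)
      = g.filterMap (pvProj ids k) := by
  induction g with
  | nil => rfl
  | cons a g ih =>
    simp only [List.map_cons]
    by_cases heq : a.1 = id
    · have h1 : (if a.1 == id then ((id, v) : String × List String) else a) = (id, v) := by simp [heq]
      have h2 : pvProj ids k (id, v) = none := by simp [pvProj, hid]
      have h3 : pvProj ids k a = none := by simp [pvProj, heq ▸ hid]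
      rw [List.filterMap_cons, h1, h2, List.filterMap_cons, h3, ih]
    · have h1 : (if a.1 == id then ((id, v) : String × List String) else a) = a := by simp [heq]
      rw [List.filterMap_cons, h1, List.filterMap_cons, ih]

-- with unique keys, the entry find? returns is the only one with that key
theorem pv_unique_entry {id : String} {c : List String} :
    ∀ g : List (String × List String), (g.map Prod.fst).Nodup →
      g.find? (fun p => p.1 == id) = some (id, c) → ∀ p ∈ g, p.1 = id → p = (id, c) := by
  intro g
  induction g with
  | nil => simp
  | cons a g ih =>
    intro hn hf p hp hpid
    simp only [List.map_cons, List.nodup_cons] at hn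
    by_cases ha : a.1 = id
    · rw [List.find?_cons_of_pos (by simp [ha])] at hf
      cases hf
      rcases List.mem_cons.1 hp with h | h
      · subst h; exact Prod.ext hpid rfl
      · have hmem : id ∈ g.map Prod.fst := by
          rw [← hpid]; exact List.mem_map_of_mem h
        exact absurd hmem (by simpa [ha] using hn.1)
    · rw [List.find?_cons_of_neg (by simp [ha])] at hf
      rcases List.mem_cons.1 hp with h | h
      · subst h; exact absurd hpid ha
      · exact ih hn.2 hf p h hpid

-- arithmetic of the cap: A's "len <= caps_per_img" append guard versus B's take (caps+1).toNat
theorem pv_take_app {c : List String} {cap : String} {caps : Int}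
    (h : ((c.take (caps + 1).toNat).length : Int) ≤ caps) :
    c.take (caps + 1).toNat ++ [cap] = (c ++ [cap]).take (caps + 1).toNat := by
  have h0 : 0 ≤ caps := le_trans (by positivity) h
  have hk : ((caps + 1).toNat : Int) = caps + 1 := Int.toNat_of_nonneg (by omega)
  have hlen : c.length < (caps + 1).toNat := by
    by_cases hle : (caps + 1).toNat ≤ c.length
    · exfalso; rw [List.length_take, Nat.min_eq_left hle] at h; omega
    · omega
  rw [List.take_of_length_le (by omega), List.take_of_length_le (by simp; omega)]

theorem pv_take_app_stop {c : List String} {cap : String} {caps : Int}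
    (h : ¬ ((c.take (caps + 1).toNat).length : Int) ≤ caps) :
    (c ++ [cap]).take (caps + 1).toNat = c.take (caps + 1).toNat := by
  by_cases h0 : 0 ≤ caps
  · have hk : ((caps + 1).toNat : Int) = caps + 1 := Int.toNat_of_nonneg (by omega)
    have hlen : (caps + 1).toNat ≤ c.length := by
      by_cases hle : (caps + 1).toNat ≤ c.length
      · exact hle
      · exfalso; rw [List.length_take, Nat.min_eq_right (by omega)] at h; omega
    exact List.take_append_of_le_length hlen
  · have : (caps + 1).toNat = 0 := by omega
    simp [this]


theorem pv_step (ids : List String) (caps : Int) (id cap : String)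
    (g : List (String × List String)) (hn : (g.map Prod.fst).Nodup) :
    pvStepA ids caps ⟨g.filterMap (pvProj ids (caps + 1).toNat)⟩ id cap
      = ⟨((PySem.Dict.modify ⟨g⟩ id [] (fun c => c ++ [cap])).items).filterMap (pvProj ids (caps + 1).toNat)⟩ := by
  set k := (caps + 1).toNat with hk
  by_cases hid : id ∈ ids
  · by_cases hc : g.any (fun p => p.1 == id) = true
    · -- id already grouped
      have hfs : (g.find? (fun p => p.1 == id)).isSome := List.find?_isSome.2 (List.any_eq_true.1 hc)
      obtain ⟨pr, hpr⟩ := Option.isSome_iff_exists.1 hfs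
      have hpr1 : pr.1 = id := by simpa using List.find?_some hpr
      have hpr' : g.find? (fun p => p.1 == id) = some (id, pr.2) := by
        rw [hpr, show pr = (id, pr.2) from Prod.ext hpr1 rfl]
      set c := pr.2 with hc2
      have huniq := pv_unique_entry g hn hpr'
      have hget : (PySem.Dict.get? (⟨g.filterMap (pvProj ids k)⟩ : PySem.Dict String (List String)) id) = some (c.take k) := by
        simp only [PySem.Dict.get?, PySem.Dict.items]
        rw [pv_find?_filterMap k hid, hpr']
        rfl
      have hcontains : (PySem.Dict.contains (⟨g.filterMap (pvProj ids k)⟩ : PySem.Dict String (List String)) id) = true := by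
        simp only [PySem.Dict.contains, PySem.Dict.items]
        rw [pv_any_filterMap]
        simp [hid, hc]
      have hcg : (PySem.Dict.contains (⟨g⟩ : PySem.Dict String (List String)) id) = true := by
        simpa [PySem.Dict.contains] using hc
      have hgetg : (PySem.Dict.get? (⟨g⟩ : PySem.Dict String (List String)) id) = some c := by
        simp [PySem.Dict.get?, hpr']
      simp only [pvStepA, if_pos hid, hcontains, if_true, PySem.Dict.getD]
      rw [hget]
      simp only [Option.getD_some, PySem.Dict.modify, PySem.Dict.getD]
      rw [hgetg]
      simp only [Option.getD_some, PySem.Dict.insert, hcg, if_true, hcontains]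
      by_cases hcap : ((c.take k).length : Int) ≤ caps
      · rw [if_pos hcap]
        rw [pv_filterMap_replace_of_mem k hid (c ++ [cap]) g]
        rw [hk] at hcap ⊢
        rw [← pv_take_app hcap, hget]
        simp only [Option.getD_some]
        rw [hk]
      · rw [if_neg hcap]
        rw [pv_filterMap_replace_of_mem k hid (c ++ [cap]) g]
        rw [hk] at hcap ⊢
        rw [pv_take_app_stop hcap]
        refine congrArg PySem.Dict.mk (Eq.symm (pv_map_replace_eq_self ?_))
        intro p hp hpid
        obtain ⟨q, hq, hq1, hq2⟩ := pv_mem_filterMap_proj hp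
        have hqe := huniq q hq (by rw [← hq1, hpid])
        refine Prod.ext hpid ?_
        rw [hq2, hqe]
    · -- id not yet grouped
      have hcf : g.any (fun p => p.1 == id) = false := by
        simpa only [Bool.not_eq_true] using hc
      have hnog : ∀ p ∈ g, ¬ (p.1 == id) = true := by
        intro p hp
        have := List.any_eq_false.1 hcf p hp
        simpa using this
      have hcontains : (PySem.Dict.contains (⟨g.filterMap (pvProj ids k)⟩ : PySem.Dict String (List String)) id) = false := by
        simp only [PySem.Dict.contains, PySem.Dict.items]
        rw [pv_any_filterMap]
        simp [hcf]
      have hcg : (PySem.Dict.contains (⟨g⟩ : PySem.Dict String (List String)) id) = false := by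
        simpa [PySem.Dict.contains] using hcf
      have hfn : (g.filterMap (pvProj ids k)).find? (fun p => p.1 == id) = none := by
        rw [pv_find?_filterMap k hid]
        rw [List.find?_eq_none.2 hnog]
        rfl
      have hfng : g.find? (fun p => p.1 == id) = none := List.find?_eq_none.2 hnog
      have hgetn : (PySem.Dict.get? (⟨g⟩ : PySem.Dict String (List String)) id) = none := by
        simp only [PySem.Dict.get?, PySem.Dict.items]
        rw [hfng]
        rfl
      have hins : (PySem.Dict.insert (⟨g.filterMap (pvProj ids k)⟩ : PySem.Dict String (List String)) id []) = ⟨g.filterMap (pvProj ids k) ++ [(id, [])]⟩ := by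
        rw [PySem.Dict.insert, if_neg (by simp [hcontains])]
      have hmod : (PySem.Dict.modify (⟨g⟩ : PySem.Dict String (List String)) id [] (fun c => c ++ [cap])) = ⟨g ++ [(id, [cap])]⟩ := by
        rw [PySem.Dict.modify, PySem.Dict.getD, hgetn]
        simp only [Option.getD_none, List.nil_append]
        rw [PySem.Dict.insert, if_neg (by simp [hcg])]
      have hget1 : PySem.Dict.getD (⟨g.filterMap (pvProj ids k) ++ [(id, [])]⟩ : PySem.Dict String (List String)) id [] = [] := by
        simp only [PySem.Dict.getD, PySem.Dict.get?, PySem.Dict.items]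
        rw [List.find?_append, hfn]
        simp
      have hcont1 : PySem.Dict.contains (⟨g.filterMap (pvProj ids k) ++ [(id, [])]⟩ : PySem.Dict String (List String)) id = true := by
        simp only [PySem.Dict.contains, PySem.Dict.items, List.any_append]
        simp
      rw [hmod]
      simp only [pvStepA, if_pos hid, hcontains, Bool.false_eq_true, if_false, hins]
      simp only [PySem.Dict.modify, hget1]
      simp only [List.length_nil, Nat.cast_zero, List.nil_append, PySem.Dict.items, List.filterMap_append]
      by_cases hcap : (0 : Int) ≤ caps
      · rw [if_pos hcap, PySem.Dict.insert, if_pos hcont1]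
        simp only [PySem.Dict.items, List.map_append]
        rw [pv_map_replace_of_no_key (by rw [pv_any_filterMap]; simp [hcf])]
        have hk1 : k = caps.toNat + 1 := by omega
        simp [pvProj, hid, hk1]
      · rw [if_neg hcap]
        have hk0 : k = 0 := by omega
        simp [pvProj, hid, hk0]
  · -- id in no bucket
    simp only [pvStepA, if_neg hid]
    rw [PySem.Dict.modify, PySem.Dict.insert]
    split
    · simp only [PySem.Dict.items]
      rw [pv_filterMap_replace_of_not_mem k hid _ g]
    · simp [List.filterMap_append, pvProj, hid]

theorem pv_nodup_step {g : List (String × List String)} (hn : (g.map Prod.fst).Nodup)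
    (id cap : String) :
    (((PySem.Dict.modify ⟨g⟩ id [] (fun c => c ++ [cap])).items).map Prod.fst).Nodup := by
  rw [PySem.Dict.modify, PySem.Dict.insert]
  split
  · rename_i hco
    simp only [PySem.Dict.items, List.map_map]
    rw [show (Prod.fst ∘ fun p : String × List String => if p.1 == id then (id, (PySem.Dict.getD ⟨g⟩ id [] ++ [cap])) else p) = Prod.fst from by
      funext p; by_cases h : p.1 = id <;> simp [h]]
    exact hn
  · rename_i hco
    simp only [PySem.Dict.items, List.map_append, List.map_cons, List.map_nil]
    rw [List.nodup_append]
    refine ⟨hn, List.nodup_singleton _, ?_⟩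
    intro a ha b hb
    simp only [List.mem_singleton] at hb
    subst hb
    intro heq
    rw [heq] at ha
    obtain ⟨p, hp, hp1⟩ := List.mem_map.1 ha
    exact hco (by
      simp only [PySem.Dict.contains, PySem.Dict.items, List.any_eq_true]
      exact ⟨p, hp, by simp [hp1]⟩)

theorem pv_bucket (ids : List String) (caps : Int) (ps : List (String × String)) :
    ∀ (g : List (String × List String)), (g.map Prod.fst).Nodup →
    ps.foldl (fun d p => pvStepA ids caps d p.1 p.2) ⟨g.filterMap (pvProj ids (caps + 1).toNat)⟩
      = ⟨((ps.foldl (fun d p => PySem.Dict.modify d p.1 [] (fun c => c ++ [p.2])) (⟨g⟩ : PySem.Dict String (List String))).items).filterMap (pvProj ids (caps + 1).toNat)⟩ := by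
  induction ps with
  | nil => intro g _; rfl
  | cons p ps ih =>
    intro g hn
    simp only [List.foldl_cons]
    rw [pv_step ids caps p.1 p.2 g hn]
    exact ih _ (pv_nodup_step hn p.1 p.2)

theorem pv_foldl_skip {σ : Type} (F : σ → (String × String) → σ) (lines : List String) :
    ∀ (init : σ),
    lines.foldl (fun st line => match pvParseLine line with | none => st | some pc => F st pc) init
      = (lines.filterMap pvParseLine).foldl F init := by
  induction lines with
  | nil => intro init; rfl
  | cons l lines ih =>
    intro init
    simp only [List.foldl_cons, List.filterMap_cons]
    cases pvParseLine l <;> simp [ih]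
theorem pv_foldl_triple (tr ev te : List String) (caps : Int) (ps : List (String × String)) :
    ∀ (a b c : PySem.Dict String (List String)),
    ps.foldl (fun st pc => (pvStepA tr caps st.1 pc.1 pc.2, pvStepA ev caps st.2.1 pc.1 pc.2, pvStepA te caps st.2.2 pc.1 pc.2)) (a, b, c)
      = (ps.foldl (fun d p => pvStepA tr caps d p.1 p.2) a,
         ps.foldl (fun d p => pvStepA ev caps d p.1 p.2) b,
         ps.foldl (fun d p => pvStepA te caps d p.1 p.2) c) := by
  induction ps with
  | nil => intro a b c; rfl
  | cons p ps ih =>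
    intro a b c
    simp only [List.foldl_cons, ih]

theorem pv_bucket_empty (ids : List String) (caps : Int) (ps : List (String × String)) :
    ps.foldl (fun d p => pvStepA ids caps d p.1 p.2) PySem.Dict.empty
      = ⟨((ps.foldl (fun d p => PySem.Dict.modify d p.1 [] (fun c => c ++ [p.2])) (PySem.Dict.empty : PySem.Dict String (List String))).items).filterMap (pvProj ids (caps + 1).toNat)⟩ :=
  pv_bucket ids caps ps [] (by simp)

-- ===== VERDICT (by name: the statement is the Claim_ definition above) =====
theorem load_captions_spec : Claim_equal_load_captions := by
  intro data train_ids eval_ids test_ids caps _ _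
  unfold Spec_load_captions load_captions load_captions_alt pvGroup pvProject
  simp only []
  rw [pv_foldl_skip, pv_foldl_skip
    (fun (g : PySem.Dict String (List String)) pc => g.modify pc.1 [] (fun c => c ++ [pc.2]))]
  set ps := (((PySem.Str.split? data "\n").getD [])).filterMap pvParseLine with hps
  rw [pv_foldl_triple train_ids eval_ids test_ids caps ps]
  rw [pv_bucket_empty train_ids caps ps, pv_bucket_empty eval_ids caps ps, pv_bucket_empty test_ids caps ps]
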